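-- pv_equiv track=rewrite | github.com/nicholas-camarda/bayesian-t1dm | src/bayesian_t1dm/acquisition.py | _first_existing_key
-- ===== SOURCE A (Python) =====
-- from typing import Any, Iterable, Mapping, Protocol, Sequence
--
-- def _first_existing_key(mapping: Mapping[str, Any], candidates: Sequence[str]) -> str | None:
--     normalized = {str(key).strip().lower(): str(key) for key in mapping.keys()}
--     for candidate in candidates:
--         key = candidate.strip().lower()
--         if key in normalized:
--             return normalized[key]
--     for candidate in candidates:
--         key = candidate.strip().lower()
--         for normalized_key, original in normalized.items():
--             if key in normalized_key:
--                 return original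
--     return None
-- ===== SOURCE B (Python) =====
-- def _first_existing_key(mapping, candidates):
--     normalized = {str(key).strip().lower(): str(key) for key in mapping.keys()}
--     fallback = None
--     for candidate in candidates:
--         key = candidate.strip().lower()
--         if key in normalized:
--             return normalized[key]
--         if fallback is None:
--             fallback = next(
--                 (original for normalized_key, original in normalized.items()
--                  if key in normalized_key),
--                 None,
--             )
--     return fallback
-- ===== Notes on version B (the rewrite author's own statement) =====
-- stated objective: simpler
-- what changed: A's two sequential passes over candidates (exact lookup pass, then substring-scan pass) are fused into a single pass that returns exact hits immediately and records only the first substring match in a fallback accumulator (found with next()/find?), returned after the loop.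
import Mathlib
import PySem

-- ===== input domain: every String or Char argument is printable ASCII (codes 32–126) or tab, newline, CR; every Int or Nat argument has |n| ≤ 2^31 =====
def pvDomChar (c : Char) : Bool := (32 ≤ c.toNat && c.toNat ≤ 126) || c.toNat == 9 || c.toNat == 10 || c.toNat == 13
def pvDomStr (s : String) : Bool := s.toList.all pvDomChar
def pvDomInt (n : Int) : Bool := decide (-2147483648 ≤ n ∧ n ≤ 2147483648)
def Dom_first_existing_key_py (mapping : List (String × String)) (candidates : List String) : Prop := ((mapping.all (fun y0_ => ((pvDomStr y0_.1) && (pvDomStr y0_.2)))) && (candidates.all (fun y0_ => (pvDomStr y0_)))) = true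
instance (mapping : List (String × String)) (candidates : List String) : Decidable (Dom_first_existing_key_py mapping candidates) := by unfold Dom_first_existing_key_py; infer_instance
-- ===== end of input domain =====

-- B fuses A's two sequential candidate passes into one pass with a one-shot `fallback`
-- accumulator (objective: simpler — one loop over candidates instead of two).

-- normalized = {key.strip().lower(): key for key in mapping.keys()}  (shared by both Pythons verbatim)
def pvNorm (mapping : List (String × String)) : PySem.Dict String String :=
  mapping.foldl (fun d kv => d.insert (PySem.Str.lower (PySem.Str.strip kv.1)) kv.1) PySem.Dict.empty

-- ===== PORT A =====
-- first loop: exact lookup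
def pvLoop1 (d : PySem.Dict String String) : List String → Option String
  | [] => none
  | c :: rest =>
    let key := PySem.Str.lower (PySem.Str.strip c)
    match d.get? key with
    | some v => some v
    | none => pvLoop1 d rest

-- inner loop of A's second pass: first normalized key containing `key`
def pvScan (key : String) : List (String × String) → Option String
  | [] => none
  | (nk, orig) :: rest => if PySem.Str.isIn key nk then some orig else pvScan key rest

-- second loop: substring fallback
def pvLoop2 (d : PySem.Dict String String) : List String → Option String
  | [] => none
  | c :: rest =>
    match pvScan (PySem.Str.lower (PySem.Str.strip c)) d.items with
    | some v => some v
    | none => pvLoop2 d rest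

def first_existing_key_py (mapping : List (String × String)) (candidates : List String) : Option String :=
  let normalized := pvNorm mapping
  match pvLoop1 normalized candidates with
  | some v => some v
  | none => pvLoop2 normalized candidates

-- ===== PORT B =====
-- single pass: exact hit returns at once; first substring hit is only recorded in `fallback`
def pvLoopB (d : PySem.Dict String String) (fallback : Option String) : List String → Option String
  | [] => fallback
  | c :: rest =>
    let key := PySem.Str.lower (PySem.Str.strip c)
    match d.get? key with
    | some v => some v
    | none =>
      let fb := match fallback with
        | some v => some v
        | none => (d.items.find? (fun p => PySem.Str.isIn key p.1)).map Prod.snd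
      pvLoopB d fb rest

def first_existing_key_py_alt (mapping : List (String × String)) (candidates : List String) : Option String :=
  pvLoopB (pvNorm mapping) none candidates

-- ===== PRECONDITION & SPEC =====
def Spec_first_existing_key_py (mapping : List (String × String)) (candidates : List String) (out : Option String) : Prop := out = first_existing_key_py_alt mapping candidates
instance (mapping : List (String × String)) (candidates : List String) (out : Option String) : Decidable (Spec_first_existing_key_py mapping candidates out) := by unfold Spec_first_existing_key_py; infer_instance

-- ===== CLAIM (what is proved, stated in full; the proofs are below) =====
def Claim_equal_first_existing_key_py : Prop := ∀ (mapping : List (String × String)) (candidates : List String), Dom_first_existing_key_py mapping candidates → Spec_first_existing_key_py mapping candidates (first_existing_key_py mapping candidates)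

-- ===== LEMMAS AND PROOFS =====

-- A's hand-written inner scan equals B's find?-based scan
theorem pvScan_eq_find (key : String) (items : List (String × String)) :
    pvScan key items = (items.find? (fun p => PySem.Str.isIn key p.1)).map Prod.snd := by
  induction items with
  | nil => rfl
  | cons p rest ih =>
    obtain ⟨nk, orig⟩ := p
    cases h : PySem.Chars.isIn key.toList nk.toList <;>
      simp [pvScan, List.find?, h, ih]

-- loop invariant: B's fused loop is A's exact pass, else the fallback, else A's substring pass
theorem pvLoopB_eq (d : PySem.Dict String String) (fb : Option String) (cs : List String) :
    pvLoopB d fb cs = (pvLoop1 d cs).or (fb.or (pvLoop2 d cs)) := by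
  induction cs generalizing fb with
  | nil => cases fb <;> rfl
  | cons c rest ih =>
    simp only [pvLoopB, pvLoop1, pvLoop2]
    cases hg : d.get? (PySem.Str.lower (PySem.Str.strip c)) with
    | some v => rfl
    | none =>
      rw [ih, ← pvScan_eq_find]
      cases fb with
      | some v => rfl
      | none =>
        cases hs : pvScan (PySem.Str.lower (PySem.Str.strip c)) d.items <;>
          cases pvLoop1 d rest <;> simp

-- ===== VERDICT (by name: the statement is the Claim_ definition above) =====
theorem first_existing_key_py_spec : Claim_equal_first_existing_key_py := by
  intro mapping candidates _
  show first_existing_key_py mapping candidates = first_existing_key_py_alt mapping candidates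
  unfold first_existing_key_py first_existing_key_py_alt
  rw [pvLoopB_eq]
  cases h : pvLoop1 (pvNorm mapping) candidates <;> simp [h, Option.or]
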